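-- pv_equiv track=rewrite | github.com/marimasunaga/herpes_keratitis_model | FigS4/5overlayed_distance_map_images.py | find_endpoints_in_graph
-- ===== SOURCE A (Python) =====
-- def find_endpoints_in_graph(graph, center_node):
--     branches = {}
--     visited = set()
--
--     def dfs(u, path, parent):
--         visited.add(u)
--         nbrs = [v for v in graph.get(u, []) if v != parent and v not in visited]
--         if not nbrs and u != center_node:
--             branches[u] = path
--         for v in nbrs:
--             dfs(v, path + [v], u)
--
--     dfs(center_node, [center_node], None)
--     return branches
-- ===== SOURCE B (Python) =====
-- def find_endpoints_in_graph(graph, center_node):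
--     branches = {}
--     visited = set()
--     stack = [(center_node, [center_node], None)]
--     while stack:
--         u, path, parent = stack.pop()
--         visited.add(u)
--         nbrs = [v for v in graph.get(u, []) if v != parent and v not in visited]
--         if not nbrs and u != center_node:
--             branches[u] = path
--         for v in reversed(nbrs):
--             stack.append((v, path + [v], u))
--     return branches
-- ===== Notes on version B (the rewrite author's own statement) =====
-- stated objective: alternative
-- what changed: Replaced A's nested recursive DFS closure with an iterative traversal over an explicit stack of (node, path, parent) frames, pushing children in reversed order and marking visited on pop so the depth-first order and visited timing match exactly.
import Mathlib
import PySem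

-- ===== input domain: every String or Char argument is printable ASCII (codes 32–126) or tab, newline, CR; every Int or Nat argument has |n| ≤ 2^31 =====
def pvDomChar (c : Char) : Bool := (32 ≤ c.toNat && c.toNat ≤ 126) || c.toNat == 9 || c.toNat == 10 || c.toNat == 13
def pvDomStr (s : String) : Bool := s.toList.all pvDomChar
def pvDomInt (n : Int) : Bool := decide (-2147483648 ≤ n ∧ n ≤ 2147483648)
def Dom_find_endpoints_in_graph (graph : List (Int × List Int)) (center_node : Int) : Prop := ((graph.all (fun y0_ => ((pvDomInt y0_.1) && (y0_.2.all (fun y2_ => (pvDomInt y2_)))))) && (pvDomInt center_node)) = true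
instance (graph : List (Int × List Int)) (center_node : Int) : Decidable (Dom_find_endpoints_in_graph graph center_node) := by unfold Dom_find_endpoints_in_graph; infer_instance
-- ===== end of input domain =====

-- B replaces A's recursive DFS by an iterative traversal with an explicit stack of
-- (node, path, parent) frames (children pushed in reversed order, visited marked on pop);
-- objective: alternative decomposition, same asymptotic cost, return value identical.
-- Both ports carry a fuel counter (one unit per dfs call / per popped frame) solely as a
-- totality guard; pvFuel_feig is far above the possible number of calls on any input.

def pvFuel_feig (graph : List (Int × List Int)) : Nat :=
  let s := graph.foldl (fun a p => a + p.2.length + 1) 2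
  s ^ (2 * s)

-- ===== PORT A =====
-- literal port of A's nested recursive dfs: `dfsA` is one call of `dfs`, `dfsChildrenA`
-- is the `for v in nbrs: dfs(...)` loop; the state (visited, branches) is threaded, the
-- leftover fuel is returned (with the proof r.1 ≤ fuel used only for termination).
mutual
def dfsA (g : List (Int × List Int)) (c : Int) (fuel : Nat) (u : Int) (path : List Int)
    (parent : Option Int) (st : PySem.Set Int × PySem.Dict Int (List Int)) :
    {r : Nat × (PySem.Set Int × PySem.Dict Int (List Int)) // r.1 ≤ fuel} :=
  match fuel with
  | 0 => ⟨(0, st), Nat.le_refl 0⟩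
  | Nat.succ f =>
      let vis' := PySem.Set.add st.1 u
      let nbrs := List.filter (fun v => (parent != some v) && !(PySem.Set.contains vis' v))
        ((PySem.Dict.mk g).getD u [])
      let br' := if nbrs.isEmpty && (u != c) then PySem.Dict.insert st.2 u path else st.2
      let r := dfsChildrenA g c f u path nbrs (vis', br')
      ⟨r.1, Nat.le_succ_of_le r.2⟩
  termination_by (fuel, 0)

def dfsChildrenA (g : List (Int × List Int)) (c : Int) (fuel : Nat) (u : Int)
    (path : List Int) (vs : List Int) (st : PySem.Set Int × PySem.Dict Int (List Int)) :
    {r : Nat × (PySem.Set Int × PySem.Dict Int (List Int)) // r.1 ≤ fuel} :=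
  match vs with
  | [] => ⟨(fuel, st), Nat.le_refl fuel⟩
  | v :: rest =>
      let r1 := dfsA g c fuel v (path ++ [v]) (some u) st
      let r2 := dfsChildrenA g c r1.1.1 u path rest r1.1.2
      ⟨r2.1, Nat.le_trans r2.2 r1.2⟩
  termination_by (fuel, vs.length + 1)
  decreasing_by
  · exact Prod.Lex.right fuel (by omega)
  · rcases Nat.lt_or_eq_of_le r1.2 with h | h
    · exact Prod.Lex.left _ _ h
    · rw [h]; exact Prod.Lex.right fuel (by simp)
end

def find_endpoints_in_graph (graph : List (Int × List Int)) (center_node : Int) : List (Int × List Int) :=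
  ((dfsA graph center_node (pvFuel_feig graph) center_node [center_node] none
      (PySem.Set.empty, PySem.Dict.empty)).1.2.2).items

-- ===== PORT B =====
-- literal port of Source B's loop: the stack is a list with its head as the top; pushing
-- `reversed(nbrs)` onto the end of a Python list = prepending `nbrs` in order here.
def loopB (g : List (Int × List Int)) (c : Int) :
    Nat → List (Int × List Int × Option Int) → PySem.Set Int → PySem.Dict Int (List Int) →
    PySem.Dict Int (List Int)
  | _, [], _, br => br
  | 0, _ :: _, _, br => br
  | Nat.succ f, (u, path, parent) :: rest, vis, br =>
      let vis' := PySem.Set.add vis u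
      let nbrs := List.filter (fun v => (parent != some v) && !(PySem.Set.contains vis' v))
        ((PySem.Dict.mk g).getD u [])
      let br' := if nbrs.isEmpty && (u != c) then PySem.Dict.insert br u path else br
      loopB g c f (nbrs.map (fun v => (v, path ++ [v], some u)) ++ rest) vis' br'

def find_endpoints_in_graph_alt (graph : List (Int × List Int)) (center_node : Int) : List (Int × List Int) :=
  (loopB graph center_node (pvFuel_feig graph) [(center_node, [center_node], none)]
      PySem.Set.empty PySem.Dict.empty).items

-- ===== PRECONDITION & SPEC =====
def Spec_find_endpoints_in_graph (graph : List (Int × List Int)) (center_node : Int) (out : List (Int × List Int)) : Prop := out = find_endpoints_in_graph_alt graph center_node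
instance (graph : List (Int × List Int)) (center_node : Int) (out : List (Int × List Int)) : Decidable (Spec_find_endpoints_in_graph graph center_node out) := by unfold Spec_find_endpoints_in_graph; infer_instance

-- ===== CLAIM (what is proved, stated in full; the proofs are below) =====
def Claim_equal_find_endpoints_in_graph : Prop := ∀ (graph : List (Int × List Int)) (center_node : Int), Dom_find_endpoints_in_graph graph center_node → Spec_find_endpoints_in_graph graph center_node (find_endpoints_in_graph graph center_node)

-- ===== LEMMAS AND PROOFS =====

-- run A's dfs over a list of arbitrary frames, threading fuel and state
def runFrames (g : List (Int × List Int)) (c : Int) :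
    Nat → List (Int × List Int × Option Int) → PySem.Set Int × PySem.Dict Int (List Int) →
    Nat × (PySem.Set Int × PySem.Dict Int (List Int))
  | fuel, [], st => (fuel, st)
  | fuel, (u, p, par) :: rest, st =>
      let r := dfsA g c fuel u p par st
      runFrames g c r.1.1 rest r.1.2

theorem runFrames_zero (g : List (Int × List Int)) (c : Int)
    (frames : List (Int × List Int × Option Int)) (st : PySem.Set Int × PySem.Dict Int (List Int)) :
    runFrames g c 0 frames st = (0, st) := by
  induction frames generalizing st with
  | nil => rfl
  | cons f rest ih =>
      obtain ⟨u, p, par⟩ := f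
      rw [runFrames, dfsA]
      exact ih st

theorem dfsChildrenA_eq_runFrames (g : List (Int × List Int)) (c : Int) (vs : List Int)
    (fuel : Nat) (u : Int) (path : List Int) (st : PySem.Set Int × PySem.Dict Int (List Int)) :
    (dfsChildrenA g c fuel u path vs st).1
      = runFrames g c fuel (vs.map (fun v => (v, path ++ [v], some u))) st := by
  induction vs generalizing fuel st with
  | nil => rw [List.map_nil, runFrames, dfsChildrenA]
  | cons v rest ih =>
      rw [dfsChildrenA, List.map_cons, runFrames]
      exact ih _ _

theorem runFrames_append (g : List (Int × List Int)) (c : Int) (xs ys : List (Int × List Int × Option Int))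
    (fuel : Nat) (st : PySem.Set Int × PySem.Dict Int (List Int)) :
    runFrames g c fuel (xs ++ ys) st
      = runFrames g c (runFrames g c fuel xs st).1 ys (runFrames g c fuel xs st).2 := by
  induction xs generalizing fuel st with
  | nil => rfl
  | cons f rest ih =>
      obtain ⟨u, p, par⟩ := f
      rw [List.cons_append, runFrames, runFrames]
      exact ih _ _

theorem loopB_nil (g : List (Int × List Int)) (c : Int) (fuel : Nat)
    (vis : PySem.Set Int) (br : PySem.Dict Int (List Int)) :
    loopB g c fuel [] vis br = br := by
  cases fuel <;> rfl

theorem loopB_zero (g : List (Int × List Int)) (c : Int)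
    (stack : List (Int × List Int × Option Int)) (vis : PySem.Set Int) (br : PySem.Dict Int (List Int)) :
    loopB g c 0 stack vis br = br := by
  cases stack with
  | nil => rfl
  | cons f rest => rfl

theorem loopB_eq_runFrames (g : List (Int × List Int)) (c : Int) (fuel : Nat) :
    ∀ (frames rest : List (Int × List Int × Option Int))
      (vis : PySem.Set Int) (br : PySem.Dict Int (List Int)),
      loopB g c fuel (frames ++ rest) vis br
        = loopB g c (runFrames g c fuel frames (vis, br)).1 rest
            (runFrames g c fuel frames (vis, br)).2.1 (runFrames g c fuel frames (vis, br)).2.2 := by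
  induction fuel using Nat.strong_induction_on with
  | _ fuel ih =>
    intro frames rest vis br
    cases frames with
    | nil => rfl
    | cons fr fs =>
        obtain ⟨u, p, par⟩ := fr
        cases fuel with
        | zero =>
            rw [runFrames_zero, loopB_zero, loopB_zero]
        | succ f =>
            rw [List.cons_append, loopB, runFrames, dfsA]
            dsimp only
            rw [← List.append_assoc]
            rw [ih f (Nat.lt_succ_self f)]
            rw [dfsChildrenA_eq_runFrames, runFrames_append]

-- ===== VERDICT (by name: the statement is the Claim_ definition above) =====
theorem find_endpoints_in_graph_spec : Claim_equal_find_endpoints_in_graph := by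
  intro graph center_node _
  unfold Spec_find_endpoints_in_graph find_endpoints_in_graph find_endpoints_in_graph_alt
  rw [show [(center_node, [center_node], (none : Option Int))]
        = [(center_node, [center_node], (none : Option Int))] ++ [] from rfl,
      loopB_eq_runFrames]
  rw [loopB_nil, runFrames, runFrames]
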